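-- pv_equiv track=rewrite | github.com/hyhy2001/check_disk | src/formatters/table_formatter.py | _create_multicolumn_rows
-- ===== SOURCE A (Python) =====
-- from typing import Dict, List, Optional
--
-- def _create_multicolumn_rows(items: List[str], num_rows: int, num_columns: int) -> List[List[str]]:
--     """Create rows for a multi-column display with sequential numbering."""
--     rows = []
--     for i in range(num_rows):
--         row = []
--         for j in range(num_columns):
--             idx = j * num_rows + i  # This creates a top-to-bottom ordering
--             if idx < len(items):
--                 # Add sequential number before item
--                 row.append(f"{idx+1}. {items[idx]}")
--             else:
--                 row.append("")
--         rows.append(row)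
--     return rows
-- ===== SOURCE B (Python) =====
-- from typing import List
--
--
-- def _create_multicolumn_rows(items: List[str], num_rows: int, num_columns: int) -> List[List[str]]:
--     """Create rows for a multi-column display with sequential numbering.
--
--     Single pass: pre-allocate the grid of empty cells, then place each
--     item at (idx % num_rows, idx // num_rows); items past the grid are dropped.
--     """
--     if num_rows <= 0:
--         return []
--     rows = [[""] * num_columns for _ in range(num_rows)]
--     for idx, item in enumerate(items):
--         j, i = divmod(idx, num_rows)
--         if j >= num_columns:
--             break
--         rows[i][j] = f"{idx+1}. {item}"
--     return rows
-- ===== Notes on version B (the rewrite author's own statement) =====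
-- stated objective: alternative
-- what changed: Instead of nested row/column loops computing an index per cell, B pre-allocates the num_rows x num_columns grid of empty strings and makes a single pass over enumerate(items), placing each item at (idx % num_rows, idx // num_rows) and stopping once the grid is full.
import Mathlib
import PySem

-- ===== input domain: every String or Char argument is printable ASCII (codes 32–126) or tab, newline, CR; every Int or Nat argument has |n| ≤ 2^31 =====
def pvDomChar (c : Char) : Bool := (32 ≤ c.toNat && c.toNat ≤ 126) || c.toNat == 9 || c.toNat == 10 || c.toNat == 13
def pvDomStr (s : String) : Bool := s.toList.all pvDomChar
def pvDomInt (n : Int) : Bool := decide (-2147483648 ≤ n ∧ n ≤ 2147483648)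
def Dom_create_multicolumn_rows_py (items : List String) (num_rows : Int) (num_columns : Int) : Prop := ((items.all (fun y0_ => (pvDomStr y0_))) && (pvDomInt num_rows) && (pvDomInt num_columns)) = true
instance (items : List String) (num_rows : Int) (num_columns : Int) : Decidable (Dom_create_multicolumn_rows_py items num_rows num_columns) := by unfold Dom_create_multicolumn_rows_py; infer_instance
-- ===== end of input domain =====

-- B replaces A's nested per-cell loops by one pass over the items into a pre-allocated grid (alternative decomposition, same cost).

-- ===== PORT A =====
-- literal transliteration of A's nested loops; when the guard holds idx is a valid index, so getD's default is never used
def create_multicolumn_rows_py (items : List String) (num_rows : Int) (num_columns : Int) : List (List String) :=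
  (PySem.List.pyRange 0 num_rows 1).foldl (fun rows i =>
    rows ++ [(PySem.List.pyRange 0 num_columns 1).foldl (fun row j =>
      let idx := j * num_rows + i
      if idx < (items.length : Int) then
        row ++ [PySem.Int.toStr (idx + 1) ++ ". " ++ PySem.List.pyGetD items idx ""]
      else
        row ++ [""]) []]) []

-- ===== PORT B =====
-- the enumerate loop of Source B: idx and the grid indices are nonnegative and num_rows > 0 at the
-- (sole) call site, so Nat division/mod coincide exactly with Python's divmod here
def pvFillB (nr nc : Nat) : List String → Nat → List (List String) → List (List String)
  | [], _, rows => rows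
  | item :: rest, idx, rows =>
    let j := idx / nr
    let i := idx % nr
    if nc ≤ j then rows
    else pvFillB nr nc rest (idx + 1)
      (rows.modify i (fun row => row.set j (PySem.Int.toStr ((idx : Int) + 1) ++ ". " ++ item)))

def create_multicolumn_rows_py_alt (items : List String) (num_rows : Int) (num_columns : Int) : List (List String) :=
  if num_rows ≤ 0 then []
  else pvFillB num_rows.toNat num_columns.toNat items 0
    (List.replicate num_rows.toNat (List.replicate num_columns.toNat ""))

-- ===== PRECONDITION & SPEC =====
def Spec_create_multicolumn_rows_py (items : List String) (num_rows : Int) (num_columns : Int) (out : List (List String)) : Prop := out = create_multicolumn_rows_py_alt items num_rows num_columns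
instance (items : List String) (num_rows : Int) (num_columns : Int) (out : List (List String)) : Decidable (Spec_create_multicolumn_rows_py items num_rows num_columns out) := by unfold Spec_create_multicolumn_rows_py; infer_instance

-- ===== CLAIM (what is proved, stated in full; the proofs are below) =====
def Claim_equal_create_multicolumn_rows_py : Prop := ∀ (items : List String) (num_rows : Int) (num_columns : Int), Dom_create_multicolumn_rows_py items num_rows num_columns → Spec_create_multicolumn_rows_py items num_rows num_columns (create_multicolumn_rows_py items num_rows num_columns)

-- ===== LEMMAS AND PROOFS =====

-- the value of cell (i, j) (with linear index t = j*nr + i) in both programs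
def pvCell (items : List String) (t : Nat) : String :=
  if t < items.length then PySem.Int.toStr ((t : Int) + 1) ++ ". " ++ items.getD t "" else ""

def pvGridSpec (items : List String) (nr nc : Nat) : List (List String) :=
  (List.range nr).map (fun i => (List.range nc).map (fun j => pvCell items (j * nr + i)))

theorem pvFoldl_append_ite {α β : Type} (p : α → Prop) [DecidablePred p] (f g : α → β) :
    ∀ (l : List α) (acc : List β),
      l.foldl (fun acc x => if p x then acc ++ [f x] else acc ++ [g x]) acc
        = acc ++ l.map (fun x => if p x then f x else g x) := by
  intro l
  induction l with
  | nil => simp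
  | cons x xs ih =>
    intro acc
    simp only [List.foldl_cons, List.map_cons]
    by_cases h : p x <;> simp [h, ih]

theorem pvPortA_eq (items : List String) (nr nc : Int) :
    create_multicolumn_rows_py items nr nc = pvGridSpec items nr.toNat nc.toNat := by
  unfold create_multicolumn_rows_py pvGridSpec
  rw [PySem.List.pyRange_one, PySem.List.pyRange_one]
  simp only [Int.sub_zero, zero_add, List.foldl_map]
  rw [PySem.List.foldl_append_singleton_eq_map, List.nil_append]
  refine List.map_congr_left ?_
  intro k hk
  rw [List.mem_range] at hk
  have hnr : ((nr.toNat : Nat) : Int) = nr := by omega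
  rw [pvFoldl_append_ite (fun kj : Nat => (kj : Int) * nr + (k : Int) < (items.length : Int)),
    List.nil_append]
  refine List.map_congr_left ?_
  intro kj _
  have hT : (kj : Int) * nr + (k : Int) = ((kj * nr.toNat + k : Nat) : Int) := by
    push_cast; rw [hnr]
  rw [hT, pvCell]
  by_cases h : kj * nr.toNat + k < items.length
  · rw [if_pos (by exact_mod_cast h), if_pos h, PySem.List.pyGetD_natCast]
  · rw [if_neg (by exact_mod_cast h), if_neg h]

-- a grid with the right dimensions is the map of its own cells
theorem pvGrid_ext (nr nc : Nat) (rows : List (List String))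
    (hlen : rows.length = nr) (hrow : ∀ r ∈ rows, r.length = nc) :
    rows = (List.range nr).map (fun i => (List.range nc).map (fun j => (rows.getD i []).getD j "")) := by
  apply List.ext_getElem
  · simp [hlen]
  · intro i h1 h2
    simp only [List.getElem_map, List.getElem_range]
    have hi : i < rows.length := h1
    apply List.ext_getElem
    · simp [hrow _ (List.getElem_mem hi)]
    · intro j hj1 hj2
      simp only [List.getElem_map, List.getElem_range]
      rw [List.getD_eq_getElem rows [] hi, List.getD_eq_getElem]

theorem pvFill_eq (nr nc : Nat) (hnr : 0 < nr) :
    ∀ (rest : List String) (idx : Nat) (rows : List (List String)),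
      rows.length = nr → (∀ r ∈ rows, r.length = nc) →
      pvFillB nr nc rest idx rows =
        (List.range nr).map (fun i => (List.range nc).map (fun j =>
          if idx ≤ j * nr + i ∧ j * nr + i - idx < rest.length
          then PySem.Int.toStr (((j * nr + i : Nat) : Int) + 1) ++ ". " ++ rest.getD (j * nr + i - idx) ""
          else (rows.getD i []).getD j "")) := by
  intro rest
  induction rest with
  | nil =>
    intro idx rows hlen hrow
    simp only [pvFillB, List.length_nil]
    have h := pvGrid_ext nr nc rows hlen hrow
    conv_lhs => rw [h]
    refine List.map_congr_left ?_
    intro i _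
    refine List.map_congr_left ?_
    intro j _
    rw [if_neg (by omega)]
  | cons item rest ih =>
    intro idx rows hlen hrow
    simp only [pvFillB]
    by_cases hbr : nc ≤ idx / nr
    · rw [if_pos hbr]
      have hidx : nc * nr ≤ idx := (Nat.le_div_iff_mul_le hnr).mp hbr
      have h := pvGrid_ext nr nc rows hlen hrow
      conv_lhs => rw [h]
      refine List.map_congr_left ?_
      intro i hi
      rw [List.mem_range] at hi
      refine List.map_congr_left ?_
      intro j hj
      rw [List.mem_range] at hj
      have hT : j * nr + i < nc * nr := by
        calc j * nr + i < j * nr + nr := by omega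
          _ = (j + 1) * nr := by ring
          _ ≤ nc * nr := Nat.mul_le_mul_right nr (by omega)
      rw [if_neg (by omega)]
    · rw [if_neg hbr]
      have hj0 : idx / nr < nc := Nat.lt_of_not_le hbr
      have hi0 : idx % nr < nr := Nat.mod_lt _ hnr
      set s := PySem.Int.toStr ((idx : Int) + 1) ++ ". " ++ item with hs
      have hlen' : (rows.modify (idx % nr) (fun row => row.set (idx / nr) s)).length = nr := by
        rw [List.length_modify, hlen]
      have hrow' : ∀ r ∈ rows.modify (idx % nr) (fun row => row.set (idx / nr) s), r.length = nc := by
        intro r hr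
        rw [List.mem_iff_getElem] at hr
        obtain ⟨m, hm, rfl⟩ := hr
        rw [List.getElem_modify]
        split
        · rw [List.length_set]
          exact hrow _ (List.getElem_mem _)
        · exact hrow _ (List.getElem_mem _)
      rw [ih (idx + 1) _ hlen' hrow']
      refine List.map_congr_left ?_
      intro i hi
      rw [List.mem_range] at hi
      refine List.map_congr_left ?_
      intro j hj
      rw [List.mem_range] at hj
      have hilen : i < rows.length := by omega
      have hilen' : i < (rows.modify (idx % nr) (fun row => row.set (idx / nr) s)).length := by omega
      have hdm : nr * (idx / nr) + idx % nr = idx := Nat.div_add_mod idx nr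
      by_cases hT : j * nr + i = idx
      · -- this is exactly the cell being written this iteration
        have h1 : (j * nr + i) % nr = i := by
          rw [Nat.add_comm, Nat.add_mul_mod_self_right, Nat.mod_eq_of_lt hi]
        have h2 : (j * nr + i) / nr = j := by
          rw [Nat.add_comm, Nat.add_mul_div_right _ _ hnr, Nat.div_eq_of_lt hi, Nat.zero_add]
        have hje : j = idx / nr := by rw [← hT, h2]
        have hie : i = idx % nr := by rw [← hT, h1]
        -- the (idx+1)-condition fails; the write is recovered from the modified grid
        rw [if_neg (by omega), if_pos (by simp; omega)]
        rw [List.getD_eq_getElem _ [] hilen', List.getElem_modify, if_pos hie.symm]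
        rw [hT, Nat.sub_self, List.getD_cons_zero, hje]
        rw [List.getD_eq_getElem _ ""
          (by rw [List.length_set, hrow _ (List.getElem_mem hilen)]; exact hj0),
          List.getElem_set_self]
      · -- untouched this iteration: conditions shift by one, the modified grid agrees with rows here
        have hcell : ((rows.modify (idx % nr) (fun row => row.set (idx / nr) s)).getD i []).getD j ""
            = (rows.getD i []).getD j "" := by
          rw [List.getD_eq_getElem _ [] hilen', List.getElem_modify]
          split
          · rename_i hie
            have hje : j ≠ idx / nr := by
              intro h
              apply hT
              rw [h, ← hie, Nat.mul_comm (idx / nr) nr]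
              exact hdm
            have hjlen : j < rows[i].length := by rw [hrow _ (List.getElem_mem hilen)]; omega
            rw [List.getD_eq_getElem _ "" (by rw [List.length_set]; exact hjlen),
              List.getElem_set_ne (Ne.symm hje), List.getD_eq_getElem rows [] hilen,
              List.getD_eq_getElem _ "" hjlen]
          · rw [List.getD_eq_getElem rows [] hilen]
        rw [hcell]
        by_cases hc : idx ≤ j * nr + i ∧ j * nr + i - idx < rest.length + 1
        · rw [if_pos (by omega), if_pos (by simpa using hc)]
          have h1 : j * nr + i - idx = (j * nr + i - (idx + 1)) + 1 := by omega
          rw [h1, List.getD_cons_succ]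
        · rw [if_neg (by omega), if_neg (by simpa using hc)]

theorem pvPortB_eq (items : List String) (nr nc : Int) :
    create_multicolumn_rows_py_alt items nr nc = pvGridSpec items nr.toNat nc.toNat := by
  unfold create_multicolumn_rows_py_alt pvGridSpec
  by_cases h : nr ≤ 0
  · rw [if_pos h]
    have : nr.toNat = 0 := by omega
    rw [this]
    simp
  · rw [if_neg h]
    have hnr : 0 < nr.toNat := by omega
    rw [pvFill_eq nr.toNat nc.toNat hnr items 0
      (List.replicate nr.toNat (List.replicate nc.toNat ""))
      (by rw [List.length_replicate]) (by intro r hr; rw [List.eq_of_mem_replicate hr, List.length_replicate])]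
    refine List.map_congr_left ?_
    intro i hi
    rw [List.mem_range] at hi
    refine List.map_congr_left ?_
    intro j hj
    rw [List.mem_range] at hj
    rw [pvCell]
    by_cases hc : j * nr.toNat + i < items.length
    · rw [if_pos (by omega), if_pos hc, Nat.sub_zero]
    · rw [if_neg (by omega), if_neg hc]
      rw [List.getD_eq_getElem _ [] (by rw [List.length_replicate]; omega),
        List.getElem_replicate, List.getD_eq_getElem _ "" (by rw [List.length_replicate]; omega),
        List.getElem_replicate]

-- ===== VERDICT (by name: the statement is the Claim_ definition above) =====
theorem create_multicolumn_rows_py_spec : Claim_equal_create_multicolumn_rows_py := by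
  intro items nr nc _
  unfold Spec_create_multicolumn_rows_py
  rw [pvPortA_eq, pvPortB_eq]
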